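-- pv_equiv track=rewrite | github.com/AmIRighteous/CodingChallengesAidan | src/ccuniq/ccuniq.py | parse_repeated_lines
-- ===== SOURCE A (Python) =====
-- def parse_repeated_lines(lines: list) -> str:
--     out = ""
--     count_lines = []
--     found_repeats = set()
--     prev_line = lines[0]
--     for i in range(1, len(lines)):
--         line = lines[i]
--         if line == prev_line and line not in found_repeats:
--             found_repeats.add(line)
--             out += line
--             count_lines.append(line)
--         prev_line = line
--     return out
-- ===== SOURCE B (Python) =====
-- def parse_repeated_lines(lines: list) -> str:
--     def is_rep(j):
--         return lines[j] == lines[j - 1]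
--     return "".join(
--         lines[i] for i in range(1, len(lines))
--         if is_rep(i) and not any(is_rep(j) and lines[j] == lines[i] for j in range(1, i))
--     )
-- ===== Notes on version B (the rewrite author's own statement) =====
-- stated objective: alternative
-- what changed: Replaces A's single stateful pass (accumulating string, list and seen-set) by a stateless declarative characterization: join the lines at positions that are adjacent repeats and whose value has no earlier adjacent-repeat position, checked by a nested backward scan instead of a set.
import Mathlib
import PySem

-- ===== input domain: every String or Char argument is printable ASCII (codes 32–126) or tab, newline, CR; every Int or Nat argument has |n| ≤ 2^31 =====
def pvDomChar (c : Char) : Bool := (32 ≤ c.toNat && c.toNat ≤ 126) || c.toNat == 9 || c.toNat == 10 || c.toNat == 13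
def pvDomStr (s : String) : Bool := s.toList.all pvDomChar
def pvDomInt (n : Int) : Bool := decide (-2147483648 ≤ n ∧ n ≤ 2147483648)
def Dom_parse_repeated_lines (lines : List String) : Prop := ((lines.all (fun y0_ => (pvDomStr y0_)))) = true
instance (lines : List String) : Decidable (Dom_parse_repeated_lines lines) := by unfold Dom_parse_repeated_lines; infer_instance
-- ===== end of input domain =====

-- B replaces A's single stateful pass (string/list/set accumulators) by a stateless declarative
-- characterization: join the lines at adjacent-repeat positions whose value has no earlier
-- adjacent-repeat position, checked by a nested backward scan (alternative; quadratic, no set).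
-- (Return-value claim; neither program mutates its argument.)


-- ===== PORT A =====
-- the body of A's loop: state is (out, count_lines, found_repeats, prev_line), line = lines[i]
def pvAStep (st : String × List String × PySem.Set String × String) (line : String) :
    String × List String × PySem.Set String × String :=
  if line == st.2.2.2 && !(PySem.Set.contains st.2.2.1 line) then
    (st.1 ++ line, st.2.1 ++ [line], PySem.Set.add st.2.2.1 line, line)
  else
    (st.1, st.2.1, st.2.2.1, line)

-- loop over range(1, len(lines)) indexing lines[i]
def parse_repeated_lines (lines : List String) : String :=
  let prev_line := PySem.List.pyGetD lines 0 ""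
  let st := (PySem.List.pyRange 1 (PySem.List.len lines) 1).foldl
    (fun st i => pvAStep st (PySem.List.pyGetD lines i "")) ("", [], PySem.Set.empty, prev_line)
  st.1

-- ===== PORT B =====
-- is_rep(j): lines[j] == lines[j-1]
def pvIsRep (lines : List String) (j : Int) : Bool :=
  PySem.List.pyGetD lines j "" == PySem.List.pyGetD lines (j - 1) ""

-- "".join(lines[i] for i in range(1, len(lines)) if is_rep(i) and not any(...))
def parse_repeated_lines_alt (lines : List String) : String :=
  PySem.Str.join ""
    (((PySem.List.pyRange 1 (PySem.List.len lines) 1).filter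
        (fun i => pvIsRep lines i &&
          !((PySem.List.pyRange 1 i 1).any
              (fun j => pvIsRep lines j &&
                (PySem.List.pyGetD lines j "" == PySem.List.pyGetD lines i ""))))).map
      (fun i => PySem.List.pyGetD lines i ""))

-- ===== PRECONDITION & SPEC =====
-- Pre_ excludes only the empty list, on which A raises IndexError at lines[0].
def Pre_parse_repeated_lines (lines : List String) : Prop := lines ≠ []
instance (lines : List String) : Decidable (Pre_parse_repeated_lines lines) := by unfold Pre_parse_repeated_lines; infer_instance
def pvWitness_parse_repeated_lines : List String := ["a", "a", "b", "a", "a"]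
def Spec_parse_repeated_lines (lines : List String) (out : String) : Prop := out = parse_repeated_lines_alt lines
instance (lines : List String) (out : String) : Decidable (Spec_parse_repeated_lines lines out) := by unfold Spec_parse_repeated_lines; infer_instance

-- ===== CLAIM (what is proved, stated in full; the proofs are below) =====
def Claim_equal_parse_repeated_lines : Prop := ∀ (lines : List String), Dom_parse_repeated_lines lines → Pre_parse_repeated_lines lines → Spec_parse_repeated_lines lines (parse_repeated_lines lines)

-- ===== LEMMAS AND PROOFS =====

-- the adjacent repeats of rest relative to a previous line
def pvFilt (prev : String) : List String → List String
  | [] => []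
  | x :: xs => (if x == prev then [x] else []) ++ pvFilt x xs

-- ordered dedup relative to an already-seen set
def pvDed (found : PySem.Set String) : List String → List String
  | [] => []
  | x :: xs => if PySem.Set.contains found x then pvDed found xs
               else x :: pvDed (PySem.Set.add found x) xs

theorem pvJoin_cons (x : String) (l : List String) :
    PySem.Str.join "" (x :: l) = x ++ PySem.Str.join "" l := by
  cases l with
  | nil =>
    rw [← String.toList_inj]
    simp [PySem.Str.join, PySem.Chars.join, List.intercalate]
  | cons y ys =>
    simp [PySem.Str.join, PySem.Chars.join, List.intercalate, String.ofList_append]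

theorem pvA_main (rest : List String) (prev out : String) (cl : List String)
    (found : PySem.Set String) :
    (rest.foldl pvAStep (out, cl, found, prev)).1
      = out ++ PySem.Str.join "" (pvDed found (pvFilt prev rest)) := by
  induction rest generalizing prev out cl found with
  | nil =>
    rw [← String.toList_inj]
    simp [pvFilt, pvDed, PySem.Str.join, PySem.Chars.join, List.intercalate]
  | cons x xs ih =>
    simp only [List.foldl_cons, pvAStep]
    by_cases hx : (x == prev) = true
    · by_cases hc : PySem.Set.contains found x = true
      · have hm : x ∈ found := by simpa using hc
        rw [if_neg (by simp [hx, hm])]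
        rw [ih]
        simp [pvFilt, pvDed, hx, hm]
      · have hm : x ∉ found := by simpa using hc
        rw [if_pos (by simp [hx, hm])]
        rw [ih]
        simp only [pvFilt, pvDed, hx, if_pos, if_neg hc, List.singleton_append]
        rw [pvJoin_cons, ← String.append_assoc]
    · rw [if_neg (by simp [hx])]
      rw [ih]
      simp [pvFilt, hx]

-- B's indexed filter/map, consumed from index k+1, equals pvDed found ∘ pvFilt on the tail,
-- provided `found` agrees with B's backward-scan predicate over the consumed prefix.
theorem pvB_main (lines : List String) (d : Nat) : ∀ (k : Nat) (found : PySem.Set String),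
    lines.length ≤ k + 1 + d →
    (∀ x : String, PySem.Set.contains found x =
       ((PySem.List.pyRange 1 ((k : Int) + 1) 1).any
          (fun j => pvIsRep lines j && (PySem.List.pyGetD lines j "" == x)))) →
    ((PySem.List.pyRange ((k : Int) + 1) (PySem.List.len lines) 1).filter
        (fun i => pvIsRep lines i &&
          !((PySem.List.pyRange 1 i 1).any
              (fun j => pvIsRep lines j &&
                (PySem.List.pyGetD lines j "" == PySem.List.pyGetD lines i ""))))).map
      (fun i => PySem.List.pyGetD lines i "")
      = pvDed found (pvFilt (PySem.List.pyGetD lines (k : Int) "") (lines.drop (k + 1))) := by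
  induction d with
  | zero =>
    intro k found hlen _
    rw [PySem.List.pyRange_one_eq_nil (by simp only [PySem.List.len_eq]; omega),
        List.drop_eq_nil_of_le (by omega)]
    simp [pvFilt, pvDed]
  | succ d ih =>
    intro k found hlen hf
    by_cases hk : lines.length ≤ k + 1
    · rw [PySem.List.pyRange_one_eq_nil (by simp only [PySem.List.len_eq]; omega),
          List.drop_eq_nil_of_le hk]
      simp [pvFilt, pvDed]
    · push Not at hk
      have hklt : k + 1 < lines.length := hk
      have hcast : (k : Int) + 1 = ((k + 1 : Nat) : Int) := by push_cast; ring
      have hgk1 : PySem.List.pyGetD lines ((k : Int) + 1) "" = lines[k + 1] := by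
        rw [hcast, PySem.List.pyGetD_natCast, List.getD_eq_getElem lines "" hklt]
      have hgk : PySem.List.pyGetD lines (k : Int) "" = lines[k] := by
        rw [PySem.List.pyGetD_natCast, List.getD_eq_getElem lines "" (by omega)]
      have hrep : pvIsRep lines ((k : Int) + 1) = (lines[k + 1] == lines[k]) := by
        unfold pvIsRep
        rw [show (k : Int) + 1 - 1 = (k : Int) by ring, hgk1, hgk]
      have hany : ((PySem.List.pyRange 1 ((k : Int) + 1) 1).any
          (fun j => pvIsRep lines j &&
            (PySem.List.pyGetD lines j "" == PySem.List.pyGetD lines ((k : Int) + 1) "")))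
          = PySem.Set.contains found lines[k + 1] := by
        rw [hgk1, ← hf]
      -- the seen-set/backward-scan correspondence advanced one step
      have hstep : ∀ (fnd : PySem.Set String),
          (∀ x, PySem.Set.contains fnd x =
            (PySem.Set.contains found x || (pvIsRep lines ((k : Int) + 1) && (lines[k + 1] == x)))) →
          (∀ x : String, PySem.Set.contains fnd x =
            ((PySem.List.pyRange 1 (((k + 1 : Nat) : Int) + 1) 1).any
              (fun j => pvIsRep lines j && (PySem.List.pyGetD lines j "" == x)))) := by
        intro fnd hfnd x
        rw [show (((k + 1 : Nat) : Int) + 1) = ((k : Int) + 1) + 1 by push_cast; ring]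
        rw [PySem.List.pyRange_one_succ_right (by omega)]
        rw [List.any_append]
        simp only [List.any_cons, List.any_nil, Bool.or_false]
        rw [← hf x, hfnd x, hgk1]
      rw [PySem.List.pyRange_one_cons (by simp only [PySem.List.len_eq]; omega),
          List.filter_cons, List.drop_eq_getElem_cons hklt, hgk]
      simp only [hrep, hany, pvFilt]
      by_cases hb : (lines[k + 1] == lines[k]) = true
      · by_cases hc : PySem.Set.contains found lines[k + 1] = true
        · rw [if_neg (by rw [hb, hc]; simp)]
          have hfnd : ∀ x, PySem.Set.contains found x =
              (PySem.Set.contains found x || (pvIsRep lines ((k : Int) + 1) && (lines[k + 1] == x))) := by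
            intro x
            by_cases hbx : (lines[k + 1] == x) = true
            · have hx : x = lines[k + 1] := ((beq_iff_eq).mp hbx).symm
              rw [hx, hc]; simp
            · simp [hbx]
          have hIH := ih (k + 1) found (by omega) (hstep found hfnd)
          rw [hcast, hIH]
          have hgk1' : PySem.List.pyGetD lines ((k + 1 : Nat) : Int) "" = lines[k + 1] := by
            rw [PySem.List.pyGetD_natCast, List.getD_eq_getElem lines "" hklt]
          rw [hgk1']
          have hm : lines[k + 1] ∈ found := by simpa using hc
          simp [pvDed, hb, hm]
        · have hcf : PySem.Set.contains found lines[k + 1] = false := by simpa using hc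
          have hmn : lines[k + 1] ∉ found := by simpa using hc
          rw [if_pos (by rw [hb, hcf]; simp)]
          simp only [List.map_cons, hgk1]
          have hfnd : ∀ x, PySem.Set.contains (PySem.Set.add found lines[k + 1]) x =
              (PySem.Set.contains found x || (pvIsRep lines ((k : Int) + 1) && (lines[k + 1] == x))) := by
            intro x
            by_cases hbx : x = lines[k + 1]
            · rw [hbx]
              simp [PySem.Set.add, hmn, hrep, hb, List.contains_eq_mem]
            · have hbx' : lines[k + 1] ≠ x := Ne.symm hbx
              simp [PySem.Set.add, hmn, List.contains_eq_mem, hbx, hbx']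
          have hIH := ih (k + 1) (PySem.Set.add found lines[k + 1]) (by omega) (hstep _ hfnd)
          rw [hcast, hIH]
          have hgk1' : PySem.List.pyGetD lines ((k + 1 : Nat) : Int) "" = lines[k + 1] := by
            rw [PySem.List.pyGetD_natCast, List.getD_eq_getElem lines "" hklt]
          rw [hgk1']
          simp [pvDed, hb, hmn, List.contains_eq_mem]
      · have hbf : (lines[k + 1] == lines[k]) = false := by simpa using hb
        rw [if_neg (by rw [hbf]; simp)]
        have hfnd : ∀ x, PySem.Set.contains found x =
            (PySem.Set.contains found x || (pvIsRep lines ((k : Int) + 1) && (lines[k + 1] == x))) := by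
          intro x; simp [hrep, hbf]
        have hIH := ih (k + 1) found (by omega) (hstep found hfnd)
        rw [hcast, hIH]
        have hgk1' : PySem.List.pyGetD lines ((k + 1 : Nat) : Int) "" = lines[k + 1] := by
          rw [PySem.List.pyGetD_natCast, List.getD_eq_getElem lines "" hklt]
        rw [hgk1']
        simp [hbf]

-- ===== VERDICT (by name: the statement is the Claim_ definition above) =====
theorem parse_repeated_lines_spec : Claim_equal_parse_repeated_lines := by
  intro lines _ hpre
  unfold Spec_parse_repeated_lines parse_repeated_lines parse_repeated_lines_alt
  dsimp only
  rw [PySem.List.foldl_pyRange_pyGetD lines "" pvAStep _ (by norm_num)]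
  rw [pvA_main]
  have hb := pvB_main lines lines.length 0 PySem.Set.empty (by omega)
    (by intro x; simp [PySem.Set.empty])
  norm_num at hb ⊢
  rw [hb]
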